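-- pv_equiv track=rewrite | github.com/TheAlgorithms/Python | maths/automorphic_number.py | is_automorphic_number
-- ===== SOURCE A (Python) =====
-- def is_automorphic_number(number: int) -> bool:
--     if not isinstance(number, int):
--         raise TypeError(f"Input value of [number={number}] must be an integer")
--     if number < 0:
--         return False
--     number_square = number * number
--     while (number > 0):
--         if (number % 10 != number_square % 10):
--             return False
--         number //= 10
--         number_square //= 10
--     return True
-- ===== SOURCE B (Python) =====
-- def is_automorphic_number(number: int) -> bool:
--     if not isinstance(number, int):
--         raise TypeError(f"Input value of [number={number}] must be an integer")
--     if number < 0: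
--         return False
--     modulus = 1
--     while modulus <= number:
--         modulus *= 10
--     return number * number % modulus == number
-- ===== Notes on version B (the rewrite author's own statement) =====
-- stated objective: alternative
-- what changed: Replaces the digit-by-digit compare-and-shift loop over number and its square with computing once the smallest power of ten exceeding number, then a single modulo comparison number*number % modulus == number.
import Mathlib
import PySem

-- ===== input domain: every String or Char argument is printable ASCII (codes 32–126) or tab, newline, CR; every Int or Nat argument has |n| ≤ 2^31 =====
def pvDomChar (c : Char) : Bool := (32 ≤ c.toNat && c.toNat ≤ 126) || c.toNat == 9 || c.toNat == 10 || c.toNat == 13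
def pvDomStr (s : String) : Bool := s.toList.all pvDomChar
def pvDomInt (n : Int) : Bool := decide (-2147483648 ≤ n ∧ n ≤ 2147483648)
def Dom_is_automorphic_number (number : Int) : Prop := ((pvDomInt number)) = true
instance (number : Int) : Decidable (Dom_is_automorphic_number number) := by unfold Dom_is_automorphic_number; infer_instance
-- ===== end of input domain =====

-- B replaces A's digit-by-digit compare loop with one smallest-power-of-ten modulus and a single modulo comparison.
-- ===== PORT A =====
-- A's while loop: compare the last digits of number and its square, shifting both right.
def pvAloop (n sq : Int) : Bool :=
  if _h : 0 < n then
    if PySem.Int.mod n 10 ≠ PySem.Int.mod sq 10 then false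
    else pvAloop (PySem.Int.floordiv n 10) (PySem.Int.floordiv sq 10)
  else true
termination_by n.toNat
decreasing_by
  have h2 : PySem.Int.floordiv n 10 = n / 10 := PySem.Int.floordiv_eq_ediv_of_pos (by omega)
  rw [h2]; omega

def is_automorphic_number (number : Int) : Bool :=
  if number < 0 then false
  else pvAloop number (number * number)

-- ===== PORT B =====
-- B's while loop: grow modulus by factors of 10 until it exceeds number (0 < m keeps the loop well-founded).
def pvBmodulus (m n : Int) (hm : 0 < m) : Int :=
  if h : m ≤ n then pvBmodulus (m * 10) n (by omega) else m
termination_by (n + 1 - m).toNat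
decreasing_by omega

def is_automorphic_number_alt (number : Int) : Bool :=
  if number < 0 then false
  else PySem.Int.mod (number * number) (pvBmodulus 1 number (by norm_num)) == number

-- ===== PRECONDITION & SPEC =====
def Spec_is_automorphic_number (number : Int) (out : Bool) : Prop := out = is_automorphic_number_alt number
instance (number : Int) (out : Bool) : Decidable (Spec_is_automorphic_number number out) := by unfold Spec_is_automorphic_number; infer_instance

-- ===== CLAIM (what is proved, stated in full; the proofs are below) =====
def Claim_equal_is_automorphic_number : Prop := ∀ (number : Int), Dom_is_automorphic_number number → Spec_is_automorphic_number number (is_automorphic_number number)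

-- ===== LEMMAS AND PROOFS =====

theorem pvBmodulus_gt (m n : Int) (hm : 0 < m) : n < pvBmodulus m n hm := by
  rw [pvBmodulus]
  split
  · exact pvBmodulus_gt (m * 10) n (by omega)
  · omega
termination_by (n + 1 - m).toNat
decreasing_by omega

theorem pvBmodulus_pos (m n : Int) (hm : 0 < m) : 0 < pvBmodulus m n hm := by
  rw [pvBmodulus]
  split
  · exact pvBmodulus_pos (m * 10) n (by omega)
  · exact hm
termination_by (n + 1 - m).toNat
decreasing_by omega

-- shifting the start value by a factor of 10 = shifting the target down one digit
theorem pvBmodulus_shift (m n : Int) (hm : 0 < m) (hn : 0 ≤ n) :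
    pvBmodulus (m * 10) n (by omega) = 10 * pvBmodulus m (n / 10) hm := by
  have hiff : m ≤ n / 10 ↔ m * 10 ≤ n := by
    rw [Int.le_ediv_iff_mul_le (by norm_num)]
  rw [pvBmodulus]; conv_rhs => rw [pvBmodulus]
  by_cases h : m * 10 ≤ n
  · rw [dif_pos h, dif_pos (hiff.mpr h)]
    exact pvBmodulus_shift (m * 10) n (by omega) hn
  · rw [dif_neg h, dif_neg (fun hc => h (hiff.mp hc))]
    ring
termination_by (n + 1 - m).toNat
decreasing_by omega

theorem pvBmodulus_one_rec (n : Int) (h1 : 1 ≤ n) :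
    pvBmodulus 1 n (by norm_num) = 10 * pvBmodulus 1 (n / 10) (by norm_num) := by
  rw [pvBmodulus, dif_pos h1]
  have := pvBmodulus_shift 1 n (by norm_num) (by omega)
  simpa using this

-- main invariant: A's loop answers whether sq ≡ n modulo the smallest power of ten above n
theorem pvAloop_eq (n sq : Int) (hn : 0 ≤ n) (hsq : 0 ≤ sq) :
    pvAloop n sq = decide (sq % pvBmodulus 1 n (by norm_num) = n) := by
  rw [pvAloop]
  by_cases hpos : 0 < n
  · have hdiv : PySem.Int.floordiv n 10 = n / 10 := PySem.Int.floordiv_eq_ediv_of_pos (by norm_num)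
    have hdivs : PySem.Int.floordiv sq 10 = sq / 10 := PySem.Int.floordiv_eq_ediv_of_pos (by norm_num)
    have hmodn : PySem.Int.mod n 10 = n % 10 := PySem.Int.mod_eq_emod_of_pos (by norm_num)
    have hmods : PySem.Int.mod sq 10 = sq % 10 := PySem.Int.mod_eq_emod_of_pos (by norm_num)
    have hn10 : 0 ≤ n / 10 := Int.ediv_nonneg hn (by norm_num)
    have hsq10 : 0 ≤ sq / 10 := Int.ediv_nonneg hsq (by norm_num)
    have IH := pvAloop_eq (n / 10) (sq / 10) hn10 hsq10
    rw [dif_pos hpos, hdiv, hdivs, hmodn, hmods]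
    set Q := pvBmodulus 1 (n / 10) (by norm_num) with hQ
    have hQpos : 0 < Q := pvBmodulus_pos 1 (n / 10) (by norm_num)
    have hQgt : n / 10 < Q := pvBmodulus_gt 1 (n / 10) (by norm_num)
    have hM : pvBmodulus 1 n (by norm_num) = 10 * Q := pvBmodulus_one_rec n (by omega)
    rw [hM]
    have e1 : sq = 10 * (sq / 10) + sq % 10 := by omega
    have e2 : sq / 10 = Q * ((sq / 10) / Q) + (sq / 10) % Q := by
      have := Int.mul_ediv_add_emod (sq / 10) Q; omega
    have b1 : 0 ≤ sq % 10 := by omega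
    have b2 : sq % 10 < 10 := by omega
    have b3 : 0 ≤ (sq / 10) % Q := Int.emod_nonneg _ (by omega)
    have b4 : (sq / 10) % Q < Q := Int.emod_lt_of_pos _ hQpos
    have hr : sq % (10 * Q) = 10 * ((sq / 10) % Q) + sq % 10 := by
      have hval : sq = 10 * ((sq / 10) % Q) + sq % 10 + (10 * Q) * ((sq / 10) / Q) := by
        linear_combination e1 + 10 * e2
      calc sq % (10 * Q)
          = (10 * ((sq / 10) % Q) + sq % 10 + (10 * Q) * ((sq / 10) / Q)) % (10 * Q) := by
            rw [← hval]
        _ = (10 * ((sq / 10) % Q) + sq % 10) % (10 * Q) := by rw [Int.add_mul_emod_self_left]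
        _ = 10 * ((sq / 10) % Q) + sq % 10 := Int.emod_eq_of_lt (by omega) (by omega)
    by_cases hd : n % 10 = sq % 10
    · rw [if_neg (by simp [hd]), IH]
      simp only [decide_eq_decide]
      rw [hr]; omega
    · rw [if_pos hd]
      have hne : ¬ (sq % (10 * Q) = n) := by rw [hr]; omega
      simp [hne]
  · have hn0 : n = 0 := by omega
    rw [dif_neg hpos]
    subst hn0
    have h1 : pvBmodulus 1 (0 : Int) (by norm_num) = 1 := by rw [pvBmodulus]; norm_num
    rw [h1]
    simp
termination_by n.toNat
decreasing_by omega

-- ===== VERDICT (by name: the statement is the Claim_ definition above) =====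
theorem is_automorphic_number_spec : Claim_equal_is_automorphic_number := by
  intro number _
  unfold Spec_is_automorphic_number is_automorphic_number is_automorphic_number_alt
  by_cases h : number < 0
  · simp [h]
  · rw [if_neg h, if_neg h]
    have hn : 0 ≤ number := by omega
    have hmod : PySem.Int.mod (number * number) (pvBmodulus 1 number (by norm_num)) =
        (number * number) % (pvBmodulus 1 number (by norm_num)) :=
      PySem.Int.mod_eq_emod_of_pos (pvBmodulus_pos 1 number (by norm_num))
    rw [pvAloop_eq number (number * number) hn (mul_nonneg hn hn), hmod]
    by_cases he : (number * number) % pvBmodulus 1 number (by norm_num) = number <;> simp [he]
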